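-- pv_equiv track=rewrite | github.com/adnan12256/Hangman | main.py | update_dashed
-- ===== SOURCE A (Python) =====
-- def update_dashed(sentence, index, matched_letter):
--     temp_str = ""
--     for i, letter in enumerate(sentence):
--         if i in index:
--             if i == 0:
--                 temp_str += matched_letter.upper()
--             else:
--                 temp_str += matched_letter
--         else:
--             temp_str += letter
--     return temp_str
-- ===== SOURCE B (Python) =====
-- def update_dashed(sentence, index, matched_letter):
--     chars = list(sentence)
--     n = len(chars)
--     for i in index:
--         if 0 <= i < n:
--             chars[i] = matched_letter.upper() if i == 0 else matched_letter
--     return "".join(chars)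
-- ===== Notes on version B (the rewrite author's own statement) =====
-- stated objective: faster
-- what changed: Instead of scanning every character and testing membership of its position in the index list, B converts the sentence to a mutable char array once and performs one bounds-checked write per entry of index, then joins.
import Mathlib
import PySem

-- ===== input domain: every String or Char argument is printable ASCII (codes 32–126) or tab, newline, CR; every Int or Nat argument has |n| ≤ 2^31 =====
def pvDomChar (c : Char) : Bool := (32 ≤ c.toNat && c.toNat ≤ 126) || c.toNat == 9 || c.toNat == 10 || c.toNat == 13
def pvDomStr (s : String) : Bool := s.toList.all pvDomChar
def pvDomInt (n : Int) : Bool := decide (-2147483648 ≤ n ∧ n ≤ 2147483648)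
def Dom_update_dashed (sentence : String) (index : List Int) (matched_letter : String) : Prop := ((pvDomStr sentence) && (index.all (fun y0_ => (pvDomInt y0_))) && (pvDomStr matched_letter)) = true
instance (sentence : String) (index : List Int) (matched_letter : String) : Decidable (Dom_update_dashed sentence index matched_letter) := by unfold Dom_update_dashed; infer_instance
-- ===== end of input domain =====

-- B replaces A's per-character membership scan with one bounds-checked write per index entry
-- into a char array, then a join (objective: faster; measured).

-- ===== PORT A =====
-- temp_str = ""; for i, letter in enumerate(sentence): … ; return temp_str
def update_dashed (sentence : String) (index : List Int) (matched_letter : String) : String :=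
  let temp_str : List Char :=
    (PySem.List.enumerate sentence.toList 0).foldl
      (fun temp_str p =>
        if p.1 ∈ index then
          if p.1 = 0 then temp_str ++ PySem.Chars.upper matched_letter.toList
          else temp_str ++ matched_letter.toList
        else temp_str ++ [p.2]) []
  String.ofList temp_str

-- ===== PORT B =====
-- chars = list(sentence); n = len(chars); for i in index: if 0 <= i < n: chars[i] = …; return "".join(chars)
-- (chars is a list of strings in Python, since matched_letter may have any length: List (List Char) here)
def update_dashed_alt (sentence : String) (index : List Int) (matched_letter : String) : String :=
  let chars : List (List Char) := sentence.toList.map (fun c => [c])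
  let n : Int := PySem.List.len chars
  let chars2 : List (List Char) := index.foldl
    (fun cs i =>
      if 0 ≤ i ∧ i < n then
        PySem.List.pySetD cs i
          (if i = 0 then PySem.Chars.upper matched_letter.toList else matched_letter.toList)
      else cs) chars
  String.ofList (PySem.Chars.join [] chars2)

-- ===== PRECONDITION & SPEC =====
def Spec_update_dashed (sentence : String) (index : List Int) (matched_letter : String) (out : String) : Prop := out = update_dashed_alt sentence index matched_letter
instance (sentence : String) (index : List Int) (matched_letter : String) (out : String) : Decidable (Spec_update_dashed sentence index matched_letter out) := by unfold Spec_update_dashed; infer_instance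

-- ===== CLAIM (what is proved, stated in full; the proofs are below) =====
def Claim_equal_update_dashed : Prop := ∀ (sentence : String) (index : List Int) (matched_letter : String), Dom_update_dashed sentence index matched_letter → Spec_update_dashed sentence index matched_letter (update_dashed sentence index matched_letter)

-- ===== LEMMAS AND PROOFS =====

-- "".join over a list of pieces is flatten
theorem join_nil_eq_flatten (l : List (List Char)) :
    PySem.Chars.join [] l = l.flatten := by
  induction l with
  | nil => exact PySem.Chars.join_nil []
  | cons a t ih =>
    cases t with
    | nil => simp [PySem.Chars.join_singleton]
    | cons b r => rw [PySem.Chars.join_cons_cons]; simp [ih]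

-- pointwise characterisation of B's write loop: position k ends up holding V k iff k occurs
-- in the index list (all writes at a position store the same value, so order is irrelevant)
theorem foldB_getElem? (V : Int → List Char) (n : Int) (idx : List Int)
    (l : List (List Char)) (hn : n = (l.length : Int)) (k : Nat) :
    (idx.foldl (fun cs i => if 0 ≤ i ∧ i < n then PySem.List.pySetD cs i (V i) else cs) l)[k]?
      = if ((k : Int) ∈ idx ∧ k < l.length) then some (V k) else l[k]? := by
  induction idx generalizing l with
  | nil => simp
  | cons i rest ih =>
    simp only [List.foldl_cons]
    by_cases hg : 0 ≤ i ∧ i < n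
    · rw [if_pos hg]
      have hlen := PySem.List.length_pySetD l i (V i)
      have hrec := ih (PySem.List.pySetD l i (V i)) (by rw [hlen, ← hn])
      rw [hlen] at hrec
      rw [hrec]
      by_cases hik : i = (k : Int)
      · subst hik
        have hk : k < l.length := by omega
        rw [PySem.List.pySetD_natCast]
        by_cases hr : ((k : Int)) ∈ rest
        · simp [hr, hk]
        · rw [if_neg (by simp [hr]), List.getElem?_set_self hk,
              if_pos ⟨List.mem_cons_self, hk⟩]
      · rw [PySem.List.pySetD_of_nonneg l (V i) hg.1, List.getElem?_set_ne (by omega)]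
        have hne : ¬ (k : Int) = i := fun h => hik h.symm
        simp [List.mem_cons, hne]
    · rw [if_neg hg, ih l hn]
      by_cases hk : k < l.length
      · have hki : (k : Int) ≠ i := by omega
        simp [List.mem_cons, hki, hk]
      · simp [hk]

theorem update_dashed_spec : Claim_equal_update_dashed := by
  intro sentence index matched_letter _
  show update_dashed sentence index matched_letter = update_dashed_alt sentence index matched_letter
  unfold update_dashed update_dashed_alt
  simp only [PySem.List.len_eq, List.length_map]
  set cs := sentence.toList with hcs
  set ms := matched_letter.toList with hms
  set U := PySem.Chars.upper ms with hU
  -- A's loop as a flatMap of per-position pieces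
  have hfun : (fun (temp_str : List Char) (p : Int × Char) =>
      if p.1 ∈ index then if p.1 = 0 then temp_str ++ U else temp_str ++ ms
      else temp_str ++ [p.2])
    = fun temp_str p =>
        temp_str ++ (if p.1 ∈ index then (if p.1 = 0 then U else ms) else [p.2]) := by
    funext t p
    split_ifs <;> rfl
  rw [hfun, PySem.List.foldl_append_eq_flatMap, List.nil_append, List.flatMap_def,
      join_nil_eq_flatten]
  congr 1
  congr 1
  -- B's written array equals A's list of per-position pieces
  refine (List.ext_getElem? fun k => ?_).symm
  rw [foldB_getElem? (fun i => if i = 0 then U else ms) (cs.length : Int) index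
        (cs.map fun c => [c]) (by simp) k]
  simp only [List.getElem?_map, PySem.List.getElem?_enumerate, List.length_map, Option.map_map]
  by_cases hk : k < cs.length
  · have h : cs[k]? = some cs[k] := List.getElem?_eq_some_iff.mpr ⟨hk, rfl⟩
    rw [h]
    simp only [Option.map_some, Function.comp]
    by_cases hmem : (k : Int) ∈ index
    · simp [hmem, hk]
    · simp [hmem, hk]
  · have h : cs[k]? = none := List.getElem?_eq_none (by omega)
    rw [h]
    simp [hk]
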